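-- pv_equiv track=rewrite | github.com/tarunyadav0204/Astrology | backend/calculators/vedic_graha_drishti.py | _iter_planet_names
-- ===== SOURCE A (Python) =====
-- from typing import Any, Dict, List, Optional, Set
--
-- PLANET_ORDER = [
--     "Sun",
--     "Moon",
--     "Mars",
--     "Mercury",
--     "Jupiter",
--     "Venus",
--     "Saturn",
--     "Rahu",
--     "Ketu",
--     "Uranus",
--     "Neptune",
--     "Pluto",
--     "Gulika",
--     "Mandi",
--     "InduLagna",
-- ]
--
-- def _iter_planet_names(planets: Dict[str, Any]):
--     seen: Set[str] = set()
--     for name in PLANET_ORDER: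
--         if name in planets:
--             seen.add(name)
--             yield name
--     for name in planets:
--         if name in seen or name in ("ascendant_longitude",):
--             continue
--         yield name
-- ===== SOURCE B (Python) =====
-- PLANET_ORDER = [
--     "Sun",
--     "Moon",
--     "Mars",
--     "Mercury",
--     "Jupiter",
--     "Venus",
--     "Saturn",
--     "Rahu",
--     "Ketu",
--     "Uranus",
--     "Neptune",
--     "Pluto",
--     "Gulika",
--     "Mandi",
--     "InduLagna",
-- ]
--
--
-- def _iter_planet_names(planets):
--     # Counting-sort style: one pass distributes every key (except the
--     # pseudo-key 'ascendant_longitude') into a priority bucket; known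
--     # planets land at their PLANET_ORDER index, unknown ones in the last
--     # bucket in dict-insertion order.
--     prio = {name: i for i, name in enumerate(PLANET_ORDER)}
--     buckets = [[] for _ in range(len(PLANET_ORDER) + 1)]
--     for name in planets:
--         if name != "ascendant_longitude":
--             buckets[prio.get(name, len(PLANET_ORDER))].append(name)
--     for bucket in buckets:
--         yield from bucket
-- ===== Notes on version B (the rewrite author's own statement) =====
-- stated objective: alternative
-- what changed: Replaces the seen-set two-pass scheme (scan PLANET_ORDER against the dict, then scan the dict against the seen set) with a counting-sort-style single distribution pass: each key except 'ascendant_longitude' is dropped into a priority bucket (PLANET_ORDER index, or a final bucket for unknown names) and the buckets are emitted in order.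
import Mathlib
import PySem

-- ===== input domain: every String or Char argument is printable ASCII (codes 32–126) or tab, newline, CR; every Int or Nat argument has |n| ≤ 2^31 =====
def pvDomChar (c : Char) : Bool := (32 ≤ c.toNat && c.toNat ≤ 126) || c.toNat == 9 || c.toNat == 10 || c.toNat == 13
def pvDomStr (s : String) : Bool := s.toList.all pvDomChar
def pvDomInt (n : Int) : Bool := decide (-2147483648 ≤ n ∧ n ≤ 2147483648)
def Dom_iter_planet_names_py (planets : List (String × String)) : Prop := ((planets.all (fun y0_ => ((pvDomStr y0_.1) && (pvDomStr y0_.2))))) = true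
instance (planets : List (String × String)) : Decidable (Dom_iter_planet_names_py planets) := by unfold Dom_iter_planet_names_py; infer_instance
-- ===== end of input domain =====

-- B replaces A's seen-set two-pass scheme with a one-pass counting-sort distribution
-- into priority buckets (alternative decomposition, same cost).

def PLANET_ORDER : List String :=
  ["Sun", "Moon", "Mars", "Mercury", "Jupiter", "Venus", "Saturn", "Rahu",
   "Ketu", "Uranus", "Neptune", "Pluto", "Gulika", "Mandi", "InduLagna"]

-- ===== PORT A =====
-- the dict parameter arrives as an association list; its keys in Python dict
-- iteration order are the first occurrences, i.e. PySem.List.dedup of the key list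
def iter_planet_names_py (planets : List (String × String)) : List String :=
  let ks := PySem.List.dedup (planets.map Prod.fst)
  let s := PLANET_ORDER.foldl
      (fun (acc : PySem.Set String × List String) name =>
        if ks.contains name then (PySem.Set.add acc.1 name, acc.2 ++ [name]) else acc)
      (PySem.Set.empty, [])
  ks.foldl
    (fun out name =>
      if PySem.Set.contains s.1 name || name == "ascendant_longitude" then out
      else out ++ [name])
    s.2

-- ===== PORT B =====
def iter_planet_names_py_alt (planets : List (String × String)) : List String :=
  let prio : PySem.Dict String Int :=
    PySem.Dict.ofList ((PySem.List.enumerate PLANET_ORDER).map (fun p => (p.2, p.1)))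
  let ks := PySem.List.dedup (planets.map Prod.fst)
  let buckets : List (List String) := List.replicate (PLANET_ORDER.length + 1) []
  let buckets := ks.foldl
      (fun bs name =>
        if name == "ascendant_longitude" then bs
        else
          let j := (prio.getD name (PLANET_ORDER.length : Int)).toNat
          bs.set j (bs.getD j [] ++ [name]))
      buckets
  buckets.flatten

-- ===== PRECONDITION & SPEC =====
def Spec_iter_planet_names_py (planets : List (String × String)) (out : List String) : Prop := out = iter_planet_names_py_alt planets
instance (planets : List (String × String)) (out : List String) : Decidable (Spec_iter_planet_names_py planets out) := by unfold Spec_iter_planet_names_py; infer_instance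

-- ===== CLAIM (what is proved, stated in full; the proofs are below) =====
def Claim_equal_iter_planet_names_py : Prop := ∀ (planets : List (String × String)), Dom_iter_planet_names_py planets → Spec_iter_planet_names_py planets (iter_planet_names_py planets)

-- ===== LEMMAS AND PROOFS =====

def ascL : String := "ascendant_longitude"

def prioD : PySem.Dict String Int :=
  PySem.Dict.ofList ((PySem.List.enumerate PLANET_ORDER).map (fun p => (p.2, p.1)))

def prioN (n : String) : Nat := (prioD.getD n (PLANET_ORDER.length : Int)).toNat

lemma prio_of_mem (n : String) (h : n ∈ PLANET_ORDER) : prioN n < 15 := by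
  fin_cases h <;> decide

lemma keys_prioD : prioD.keys = PLANET_ORDER := by decide

lemma prio_of_not_mem (n : String) (h : n ∉ PLANET_ORDER) : prioN n = 15 := by
  have hc : prioD.contains n = false := by
    rw [PySem.Dict.contains_eq_decide_mem_keys, keys_prioD]
    simpa using h
  unfold prioN
  rw [PySem.Dict.getD_of_not_contains prioD _ hc]
  rfl

lemma prio_lt (n : String) : prioN n < 16 := by
  by_cases h : n ∈ PLANET_ORDER
  · exact Nat.lt_trans (prio_of_mem n h) (by omega)
  · rw [prio_of_not_mem n h]; omega

lemma prio_inj (n : String) (i : Nat) (hi : i < 15) (h : prioN n = i) :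
    n = PLANET_ORDER.getD i "" := by
  by_cases hm : n ∈ PLANET_ORDER
  · interval_cases i <;> fin_cases hm <;> revert h <;> decide
  · rw [prio_of_not_mem n hm] at h; omega

lemma bucket_pred (i : Nat) (hi : i < 15) (n : String) :
    (n != ascL && prioN n == i) = (n == PLANET_ORDER.getD i "") := by
  by_cases he : n = PLANET_ORDER.getD i ""
  · subst he
    interval_cases i <;> decide
  · have hp : ¬ (prioN n = i) := fun hp => he (prio_inj n i hi hp)
    have l1 : (prioN n == i) = false := by simpa using hp
    have l2 : (n == PLANET_ORDER.getD i "") = false := by simpa using he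
    rw [l1, l2, Bool.and_false]

-- A's first loop
lemma loop1 (ks : List String) (names : List String) :
    ∀ (seen : PySem.Set String) (out : List String),
    names.foldl
      (fun (acc : PySem.Set String × List String) name =>
        if ks.contains name then (PySem.Set.add acc.1 name, acc.2 ++ [name]) else acc)
      (seen, out)
    = (PySem.Set.update seen (names.filter (fun n => ks.contains n)),
       out ++ names.filter (fun n => ks.contains n)) := by
  induction names with
  | nil => intro seen out; simp [PySem.Set.update]
  | cons n rest ih =>
    intro seen out
    simp only [List.foldl_cons, List.filter_cons]
    by_cases h : ks.contains n
    · rw [if_pos h, if_pos h, ih, PySem.Set.update_cons]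
      simp
    · rw [if_neg h, if_neg h, ih]

-- A's second loop
lemma loop2 (p : String → Bool) (l : List String) :
    ∀ (out : List String),
    l.foldl (fun out name => if p name then out else out ++ [name]) out
    = out ++ l.filter (fun n => !p n) := by
  induction l with
  | nil => intro out; simp
  | cons n rest ih =>
    intro out
    by_cases h : p n
    · simp [h, ih]
    · simp [h, ih]

lemma getD_set_lt {α : Type} (bs : List α) (j : Nat) (x : α) (i : Nat) (d : α)
    (hj : j < bs.length) :
    (bs.set j x).getD i d = if i = j then x else bs.getD i d := by
  by_cases h : i = j
  · subst h; simp [List.getD_eq_getElem?_getD, List.getElem?_set_self, hj]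
  · simp [List.getD_eq_getElem?_getD, List.getElem?_set_ne (by omega : j ≠ i), h]

-- B's distribution loop: length invariant
lemma buckets_length (ks : List String) :
    ∀ (bs : List (List String)),
    (ks.foldl
      (fun bs name =>
        if name == ascL then bs
        else bs.set (prioN name) (bs.getD (prioN name) [] ++ [name])) bs).length
    = bs.length := by
  induction ks with
  | nil => intro bs; rfl
  | cons n rest ih =>
    intro bs
    simp only [List.foldl_cons]
    by_cases h : n == ascL
    · rw [if_pos h, ih]
    · rw [if_neg h, ih, List.length_set]

-- B's distribution loop: contents of each bucket
lemma buckets_getD (ks : List String) :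
    ∀ (bs : List (List String)), bs.length = 16 → ∀ (i : Nat),
    (ks.foldl
      (fun bs name =>
        if name == ascL then bs
        else bs.set (prioN name) (bs.getD (prioN name) [] ++ [name])) bs).getD i []
    = bs.getD i [] ++ ks.filter (fun n => n != ascL && prioN n == i) := by
  induction ks with
  | nil => intro bs _ i; simp
  | cons n rest ih =>
    intro bs hlen i
    simp only [List.foldl_cons]
    by_cases h : n = ascL
    · rw [if_pos (by simp [h]), ih bs hlen i]
      simp [List.filter_cons, h]
    · have hj : prioN n < bs.length := by rw [hlen]; exact prio_lt n
      rw [if_neg (by simp [h]), ih _ (by simp [hlen]) i, getD_set_lt _ _ _ _ _ hj]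
      by_cases hi : i = prioN n
      · subst hi
        rw [if_pos rfl]
        simp [List.filter_cons, h]
      · rw [if_neg hi]
        simp [List.filter_cons, h, hi, Ne.symm hi]

lemma filter_eq_flatten_map {α : Type} (p : α → Bool) (l : List α) :
    l.filter p = (l.map (fun n => if p n then [n] else [])).flatten := by
  induction l with
  | nil => rfl
  | cons n rest ih =>
    by_cases h : p n <;> simp [List.filter_cons, h, ih]

lemma filter_beq_nodup (ks : List String) (h : ks.Nodup) (a : String) :
    ks.filter (fun n => n == a) = if a ∈ ks then [a] else [] := by
  induction ks with
  | nil => simp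
  | cons n rest ih =>
    rcases List.nodup_cons.mp h with ⟨hn, hrest⟩
    by_cases he : n = a
    · subst he
      have : rest.filter (fun m => m == n) = [] := by
        rw [List.filter_eq_nil_iff]; intro m hm; simp; rintro rfl; exact hn hm
      simp [List.filter_cons, this]
    · simp [List.filter_cons, he, ih hrest, Ne.symm he]

-- the main body-level equality, for any Nodup key list
lemma main_eq (ks : List String) (hnd : ks.Nodup) :
    (ks.foldl
      (fun out name =>
        if PySem.Set.contains
            (PySem.Set.update PySem.Set.empty (PLANET_ORDER.filter (fun n => ks.contains n))) name
          || name == ascL then out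
        else out ++ [name])
      (PLANET_ORDER.filter (fun n => ks.contains n)))
    = (ks.foldl
        (fun bs name =>
          if name == ascL then bs
          else bs.set (prioN name) (bs.getD (prioN name) [] ++ [name]))
        (List.replicate 16 [])).flatten := by
  rw [loop2]
  have hlen : (ks.foldl
      (fun bs name =>
        if name == ascL then bs
        else bs.set (prioN name) (bs.getD (prioN name) [] ++ [name]))
      (List.replicate 16 [])).length = 16 := by
    rw [buckets_length]; simp
  have hget : ∀ i, (ks.foldl
      (fun bs name =>
        if name == ascL then bs
        else bs.set (prioN name) (bs.getD (prioN name) [] ++ [name]))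
      (List.replicate 16 [])).getD i []
      = ks.filter (fun n => n != ascL && prioN n == i) := by
    intro i
    rw [buckets_getD ks (List.replicate 16 []) (by simp) i]
    have hrep : (List.replicate 16 ([] : List String)).getD i [] = [] := by
      rw [List.getD_eq_getElem?_getD, List.getElem?_replicate]
      split <;> rfl
    rw [hrep, List.nil_append]
  have hF : (ks.foldl
      (fun bs name =>
        if name == ascL then bs
        else bs.set (prioN name) (bs.getD (prioN name) [] ++ [name]))
      (List.replicate 16 []))
      = [ks.filter (fun n => n != ascL && prioN n == 0),
       ks.filter (fun n => n != ascL && prioN n == 1),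
       ks.filter (fun n => n != ascL && prioN n == 2),
       ks.filter (fun n => n != ascL && prioN n == 3),
       ks.filter (fun n => n != ascL && prioN n == 4),
       ks.filter (fun n => n != ascL && prioN n == 5),
       ks.filter (fun n => n != ascL && prioN n == 6),
       ks.filter (fun n => n != ascL && prioN n == 7),
       ks.filter (fun n => n != ascL && prioN n == 8),
       ks.filter (fun n => n != ascL && prioN n == 9),
       ks.filter (fun n => n != ascL && prioN n == 10),
       ks.filter (fun n => n != ascL && prioN n == 11),
       ks.filter (fun n => n != ascL && prioN n == 12),
       ks.filter (fun n => n != ascL && prioN n == 13),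
       ks.filter (fun n => n != ascL && prioN n == 14),
       ks.filter (fun n => n != ascL && prioN n == 15)] := by
    apply List.ext_getElem
    · rw [hlen]; rfl
    · intro i hi1 hi2
      rw [← List.getD_eq_getElem _ [] hi1, hget i]
      rw [hlen] at hi1
      interval_cases i <;> rfl
  rw [hF]
  have h15 : ks.filter
      (fun n => !(PySem.Set.contains
        (PySem.Set.update PySem.Set.empty (PLANET_ORDER.filter (fun n => ks.contains n))) n
        || n == ascL))
      = ks.filter (fun n => n != ascL && prioN n == 15) := by
    apply List.filter_congr
    intro a ha
    have hak : ks.contains a = true := by simpa using ha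
    by_cases hasc : a = ascL
    · simp [hasc]
    · by_cases hm : a ∈ PLANET_ORDER
      · have hp : (prioN a == 15) = false := by
          have := prio_of_mem a hm; simp; omega
        simp [hp, hm, ha]
      · have hp : (prioN a == 15) = true := by simp [prio_of_not_mem a hm]
        simp [hp, hm, bne]
  have hc0 : ks.filter (fun n => n != ascL && prioN n == 0) = if "Sun" ∈ ks then ["Sun"] else [] := by
    rw [List.filter_congr (fun a _ => bucket_pred 0 (by omega) a)]
    exact filter_beq_nodup ks hnd _
  have hc1 : ks.filter (fun n => n != ascL && prioN n == 1) = if "Moon" ∈ ks then ["Moon"] else [] := by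
    rw [List.filter_congr (fun a _ => bucket_pred 1 (by omega) a)]
    exact filter_beq_nodup ks hnd _
  have hc2 : ks.filter (fun n => n != ascL && prioN n == 2) = if "Mars" ∈ ks then ["Mars"] else [] := by
    rw [List.filter_congr (fun a _ => bucket_pred 2 (by omega) a)]
    exact filter_beq_nodup ks hnd _
  have hc3 : ks.filter (fun n => n != ascL && prioN n == 3) = if "Mercury" ∈ ks then ["Mercury"] else [] := by
    rw [List.filter_congr (fun a _ => bucket_pred 3 (by omega) a)]
    exact filter_beq_nodup ks hnd _
  have hc4 : ks.filter (fun n => n != ascL && prioN n == 4) = if "Jupiter" ∈ ks then ["Jupiter"] else [] := by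
    rw [List.filter_congr (fun a _ => bucket_pred 4 (by omega) a)]
    exact filter_beq_nodup ks hnd _
  have hc5 : ks.filter (fun n => n != ascL && prioN n == 5) = if "Venus" ∈ ks then ["Venus"] else [] := by
    rw [List.filter_congr (fun a _ => bucket_pred 5 (by omega) a)]
    exact filter_beq_nodup ks hnd _
  have hc6 : ks.filter (fun n => n != ascL && prioN n == 6) = if "Saturn" ∈ ks then ["Saturn"] else [] := by
    rw [List.filter_congr (fun a _ => bucket_pred 6 (by omega) a)]
    exact filter_beq_nodup ks hnd _
  have hc7 : ks.filter (fun n => n != ascL && prioN n == 7) = if "Rahu" ∈ ks then ["Rahu"] else [] := by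
    rw [List.filter_congr (fun a _ => bucket_pred 7 (by omega) a)]
    exact filter_beq_nodup ks hnd _
  have hc8 : ks.filter (fun n => n != ascL && prioN n == 8) = if "Ketu" ∈ ks then ["Ketu"] else [] := by
    rw [List.filter_congr (fun a _ => bucket_pred 8 (by omega) a)]
    exact filter_beq_nodup ks hnd _
  have hc9 : ks.filter (fun n => n != ascL && prioN n == 9) = if "Uranus" ∈ ks then ["Uranus"] else [] := by
    rw [List.filter_congr (fun a _ => bucket_pred 9 (by omega) a)]
    exact filter_beq_nodup ks hnd _
  have hc10 : ks.filter (fun n => n != ascL && prioN n == 10) = if "Neptune" ∈ ks then ["Neptune"] else [] := by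
    rw [List.filter_congr (fun a _ => bucket_pred 10 (by omega) a)]
    exact filter_beq_nodup ks hnd _
  have hc11 : ks.filter (fun n => n != ascL && prioN n == 11) = if "Pluto" ∈ ks then ["Pluto"] else [] := by
    rw [List.filter_congr (fun a _ => bucket_pred 11 (by omega) a)]
    exact filter_beq_nodup ks hnd _
  have hc12 : ks.filter (fun n => n != ascL && prioN n == 12) = if "Gulika" ∈ ks then ["Gulika"] else [] := by
    rw [List.filter_congr (fun a _ => bucket_pred 12 (by omega) a)]
    exact filter_beq_nodup ks hnd _
  have hc13 : ks.filter (fun n => n != ascL && prioN n == 13) = if "Mandi" ∈ ks then ["Mandi"] else [] := by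
    rw [List.filter_congr (fun a _ => bucket_pred 13 (by omega) a)]
    exact filter_beq_nodup ks hnd _
  have hc14 : ks.filter (fun n => n != ascL && prioN n == 14) = if "InduLagna" ∈ ks then ["InduLagna"] else [] := by
    rw [List.filter_congr (fun a _ => bucket_pred 14 (by omega) a)]
    exact filter_beq_nodup ks hnd _
  rw [h15, hc0, hc1, hc2, hc3, hc4, hc5, hc6, hc7, hc8, hc9, hc10, hc11, hc12, hc13, hc14]
  rw [filter_eq_flatten_map]
  simp [PLANET_ORDER, List.append_assoc]

lemma final_eq (planets : List (String × String)) :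
    iter_planet_names_py planets = iter_planet_names_py_alt planets := by
  have hnd := PySem.List.nodup_dedup (planets.map Prod.fst)
  show (PySem.List.dedup (planets.map Prod.fst)).foldl
      (fun out name =>
        if PySem.Set.contains
            (PLANET_ORDER.foldl
              (fun (acc : PySem.Set String × List String) name =>
                if (PySem.List.dedup (planets.map Prod.fst)).contains name
                then (PySem.Set.add acc.1 name, acc.2 ++ [name]) else acc)
              (PySem.Set.empty, [])).1 name
          || name == ascL then out
        else out ++ [name])
      (PLANET_ORDER.foldl
        (fun (acc : PySem.Set String × List String) name =>
          if (PySem.List.dedup (planets.map Prod.fst)).contains name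
          then (PySem.Set.add acc.1 name, acc.2 ++ [name]) else acc)
        (PySem.Set.empty, [])).2
    = ((PySem.List.dedup (planets.map Prod.fst)).foldl
        (fun bs name =>
          if name == ascL then bs
          else bs.set (prioN name) (bs.getD (prioN name) [] ++ [name]))
        (List.replicate 16 [])).flatten
  rw [loop1]
  exact main_eq _ hnd

-- ===== VERDICT (by name: the statement is the Claim_ definition above) =====
theorem iter_planet_names_py_spec : Claim_equal_iter_planet_names_py := by
  intro planets _
  unfold Spec_iter_planet_names_py
  exact final_eq planets
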